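-- pv_equiv track=rewrite | github.com/YANGSEOKWOO/Algorithm | 백준/Silver/3085. 사탕 게임/사탕 게임.py | max_run_in_col
-- ===== SOURCE A (Python) =====
-- def max_run_in_col(board, c):
--     n = len(board)
--     cnt = 1
--     best = 1
--     for r in range(1, n):
--         if board[r][c] == board[r-1][c]:
--             cnt += 1
--         else:
--             cnt = 1
--         if cnt > best:
--             best = cnt
--     return best
-- ===== SOURCE B (Python) =====
-- def _runs(col):
--     if not col:
--         return []
--     k = 1
--     while k < len(col) and col[k] == col[0]:
--         k += 1
--     return [k] + _runs(col[k:])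
--
--
-- def max_run_in_col(board, c):
--     col = [row[c] for row in board]
--     return max(_runs(col), default=1)
-- ===== Notes on version B (the rewrite author's own statement) =====
-- stated objective: alternative
-- what changed: B extracts the column once, recursively splits it into maximal runs (each found by a leading-match count), and takes the max of the run lengths with default 1, instead of threading a running counter and best through an index scan.
-- outside the precondition, e.g. on max_run_in_col([['x']], 3): A returns 1, B raises IndexError
import Mathlib
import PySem

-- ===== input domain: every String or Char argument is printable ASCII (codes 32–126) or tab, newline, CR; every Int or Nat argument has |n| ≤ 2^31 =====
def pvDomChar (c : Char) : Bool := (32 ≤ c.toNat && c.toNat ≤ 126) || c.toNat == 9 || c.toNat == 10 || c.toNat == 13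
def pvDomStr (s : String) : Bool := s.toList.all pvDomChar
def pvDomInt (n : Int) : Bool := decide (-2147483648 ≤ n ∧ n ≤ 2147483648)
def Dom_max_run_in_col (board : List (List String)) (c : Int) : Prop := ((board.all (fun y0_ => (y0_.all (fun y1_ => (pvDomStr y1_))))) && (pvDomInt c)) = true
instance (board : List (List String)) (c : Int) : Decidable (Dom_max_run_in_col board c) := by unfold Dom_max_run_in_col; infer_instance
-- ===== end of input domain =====

-- B replaces A's running-counter scan by a recursive split of the column into maximal runs
-- and takes the max run length with default 1; equal return values on Pre_ (proved below).

-- ===== PORT A =====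
def max_run_in_col (board : List (List String)) (c : Int) : Int :=
  let n := board.length
  let res := (PySem.List.pyRange 1 (n : Int) 1).foldl
    (fun (st : Int × Int) r =>
      let cnt :=
        if PySem.List.pyGetD (PySem.List.pyGetD board r []) c "" =
           PySem.List.pyGetD (PySem.List.pyGetD board (r - 1) []) c ""
        then st.1 + 1 else 1
      (cnt, if cnt > st.2 then cnt else st.2)) (1, 1)
  res.2

-- ===== PORT B =====
-- inner while loop of _runs: number of leading elements of xs equal to x
def runLenS (x : String) : List String → Nat
  | [] => 0
  | y :: ys => if y = x then 1 + runLenS x ys else 0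

-- _runs: maximal run lengths of the column, front run first, recursion on the rest
def pyruns : List String → List Nat
  | [] => []
  | x :: xs => (1 + runLenS x xs) :: pyruns (xs.drop (runLenS x xs))
termination_by l => l.length
decreasing_by
  simp only [List.length_drop, List.length_cons]
  omega

def max_run_in_col_alt (board : List (List String)) (c : Int) : Int :=
  let col := board.map (fun row => PySem.List.pyGetD row c "")
  PySem.List.maxD ((pyruns col).map (fun k => Int.ofNat k)) (fun v => v) 1

-- ===== PRECONDITION & SPEC =====
-- Pre_ excludes boards containing a row for which index c is out of range: Python A raises
-- IndexError there whenever len(board) >= 2; on a 1-row board A returns 1 without ever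
-- indexing, but B's column extraction still raises IndexError, so those inputs are excluded too.
def Pre_max_run_in_col (board : List (List String)) (c : Int) : Prop :=
  ∀ row ∈ board, PySem.Raise.InRange row.length c
instance (board : List (List String)) (c : Int) : Decidable (Pre_max_run_in_col board c) := by
  unfold Pre_max_run_in_col; infer_instance

def pvWitness_max_run_in_col : List (List String) × Int := ([["a", "b"], ["a", "c"], ["x", "c"]], 1)

def Spec_max_run_in_col (board : List (List String)) (c : Int) (out : Int) : Prop := out = max_run_in_col_alt board c
instance (board : List (List String)) (c : Int) (out : Int) : Decidable (Spec_max_run_in_col board c out) := by unfold Spec_max_run_in_col; infer_instance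

-- ===== CLAIM (what is proved, stated in full; the proofs are below) =====
def Claim_equal_max_run_in_col : Prop := ∀ (board : List (List String)) (c : Int), Dom_max_run_in_col board c → Pre_max_run_in_col board c → Spec_max_run_in_col board c (max_run_in_col board c)

-- ===== LEMMAS AND PROOFS =====

-- A's loop state: prev value, (cnt, best), remaining column entries
def aScanP : String → Int × Int → List String → Int × Int
  | _, st, [] => st
  | x, st, y :: ys =>
      let cnt := if y = x then st.1 + 1 else 1
      aScanP y (cnt, if cnt > st.2 then cnt else st.2) ys

lemma getD_append_cons (pre : List String) (x : String) (suf : List String) (d : String) :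
    (pre ++ x :: suf).getD pre.length d = x := by
  simp [List.getD]

-- A's indexed fold over range(1, n) equals the structural scan aScanP
lemma fold_idx (suf : List String) : ∀ (pre : List String) (x : String) (st : Int × Int)
    (l : List String), l = pre ++ x :: suf →
    (PySem.List.pyRange ((pre.length : Int) + 1) ((pre.length + 1 + suf.length : Nat) : Int) 1).foldl
      (fun (st : Int × Int) r =>
        let cnt :=
          if PySem.List.pyGetD l r "" = PySem.List.pyGetD l (r - 1) ""
          then st.1 + 1 else 1
        (cnt, if cnt > st.2 then cnt else st.2)) st
    = aScanP x st suf := by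
  induction suf with
  | nil =>
      intro pre x st l hl
      rw [PySem.List.pyRange_one_eq_nil (by simp)]
      rfl
  | cons y ys ih =>
      intro pre x st l hl
      subst hl
      rw [PySem.List.pyRange_one_cons
            (by simp only [List.length_cons]; push_cast; omega)]
      rw [List.foldl_cons]
      have hx : PySem.List.pyGetD (pre ++ x :: y :: ys) ((pre.length : Int) + 1 - 1) "" = x := by
        have h : (pre.length : Int) + 1 - 1 = ((pre.length : Nat) : Int) := by ring
        rw [h, PySem.List.pyGetD_natCast, getD_append_cons]
      have hy : PySem.List.pyGetD (pre ++ x :: y :: ys) ((pre.length : Int) + 1) "" = y := by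
        have h : (pre.length : Int) + 1 = (((pre ++ [x]).length : Nat) : Int) := by simp
        rw [h, PySem.List.pyGetD_natCast]
        have h2 : pre ++ x :: y :: ys = (pre ++ [x]) ++ y :: ys := by simp
        rw [h2, getD_append_cons]
      rw [hx, hy]
      have h3 : (pre.length : Int) + 1 + 1 = (((pre ++ [x]).length : Nat) : Int) + 1 := by simp
      have h4 : ((pre.length + 1 + (y :: ys).length : Nat) : Int)
              = (((pre ++ [x]).length + 1 + ys.length : Nat) : Int) := by
        simp only [List.length_cons, List.length_append, List.length_nil]
        push_cast; omega
      rw [h3, h4, ih (pre ++ [x]) y _ _ (by simp)]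
      rfl

-- characterisation of the scan by the runs of the remaining list
lemma aScanP_cons_eq (x y : String) (cnt best : Int) (ys : List String) (h : y = x) :
    aScanP x (cnt, best) (y :: ys)
    = aScanP y (cnt + 1, if cnt + 1 > best then cnt + 1 else best) ys := by
  subst h; simp [aScanP]

lemma aScanP_cons_ne (x y : String) (cnt best : Int) (ys : List String) (h : ¬ y = x) :
    aScanP x (cnt, best) (y :: ys)
    = aScanP y (1, if 1 > best then 1 else best) ys := by
  simp [aScanP, h]

lemma runLenS_cons_eq {x y : String} {ys : List String} (h : y = x) :
    runLenS x (y :: ys) = runLenS y ys + 1 := by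
  subst h; simp [runLenS, Nat.add_comm]

lemma runLenS_cons_ne {x y : String} {ys : List String} (h : ¬ y = x) :
    runLenS x (y :: ys) = 0 := by
  simp [runLenS, h]

lemma scan_runs (xs : List String) : ∀ (x : String) (cnt best : Int), cnt ≤ best →
    (aScanP x (cnt, best) xs).2
    = ((pyruns (xs.drop (runLenS x xs))).map (fun k => Int.ofNat k)).foldl max
        (max best (cnt + runLenS x xs)) := by
  induction xs with
  | nil =>
      intro x cnt best h
      simp [aScanP, runLenS, pyruns]
      omega
  | cons y ys ih =>
      intro x cnt best h
      by_cases hyx : y = x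
      · have h1 : cnt + 1 ≤ (if cnt + 1 > best then cnt + 1 else best) := by split <;> omega
        rw [aScanP_cons_eq x y cnt best ys hyx, runLenS_cons_eq hyx, List.drop_succ_cons,
            ih y (cnt + 1) _ h1]
        congr 1
        split_ifs <;> push_cast <;> omega
      · have h1 : (1 : Int) ≤ (if 1 > best then 1 else best) := by split <;> omega
        rw [aScanP_cons_ne x y cnt best ys hyx, runLenS_cons_ne hyx, List.drop_zero,
            ih y 1 _ h1,
            show pyruns (y :: ys) = (1 + runLenS y ys) :: pyruns (ys.drop (runLenS y ys)) from
              by simp only [pyruns]]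
        simp only [List.map_cons, List.foldl_cons, Int.ofNat_eq_natCast]
        congr 1
        split_ifs <;> push_cast <;> omega

lemma colD_get (board : List (List String)) (c : Int) (i : Int)
    (h0 : 0 ≤ i) (h1 : i < (board.length : Int)) :
    PySem.List.pyGetD (board.map (fun row => PySem.List.pyGetD row c "")) i ""
    = PySem.List.pyGetD (PySem.List.pyGetD board i []) c "" := by
  rw [PySem.List.pyGetD_eq_getElem (board.map (fun row => PySem.List.pyGetD row c "")) ""
        h0 (by simpa using h1),
      PySem.List.pyGetD_eq_getElem board [] h0 h1]
  simp

-- ===== VERDICT (by name: the statement is the Claim_ definition above) =====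
theorem max_run_in_col_spec : Claim_equal_max_run_in_col := by
  intro board c _ _
  show (List.foldl
      (fun (st : Int × Int) r =>
        let cnt :=
          if PySem.List.pyGetD (PySem.List.pyGetD board r []) c "" =
             PySem.List.pyGetD (PySem.List.pyGetD board (r - 1) []) c ""
          then st.1 + 1 else 1
        (cnt, if cnt > st.2 then cnt else st.2)) (1, 1)
      (PySem.List.pyRange 1 (board.length : Int) 1)).2
    = PySem.List.maxD
        ((pyruns (board.map (fun row => PySem.List.pyGetD row c ""))).map (fun k => Int.ofNat k))
        (fun v => v) 1
  rw [PySem.List.foldl_congr_mem _ _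
        (fun (st : Int × Int) r =>
          let cnt :=
            if PySem.List.pyGetD (board.map (fun row => PySem.List.pyGetD row c "")) r "" =
               PySem.List.pyGetD (board.map (fun row => PySem.List.pyGetD row c "")) (r - 1) ""
            then st.1 + 1 else 1
          (cnt, if cnt > st.2 then cnt else st.2)) _
        (by
          intro st r hr
          rw [PySem.List.mem_pyRange_one] at hr
          dsimp only
          rw [colD_get board c r (by omega) (by omega),
              colD_get board c (r - 1) (by omega) (by omega)])]
  cases hb : board.map (fun row => PySem.List.pyGetD row c "") with
  | nil =>
      have hbn : board = [] := by simpa using hb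
      subst hbn
      rw [PySem.List.pyRange_one_eq_nil (by simp)]
      simp [pyruns, PySem.List.maxD, PySem.List.max?]
  | cons x xs =>
      have hn : (board.length : Int) = ((1 + xs.length : Nat) : Int) := by
        have hl := congrArg List.length hb
        simp only [List.length_map, List.length_cons] at hl
        omega
      rw [hn]
      have hfold := fold_idx xs [] x (1, 1) (x :: xs) (by simp)
      simp only [List.length_nil, Nat.cast_zero, zero_add] at hfold
      dsimp only
      rw [hfold, scan_runs xs x 1 1 (le_refl 1),
          show pyruns (x :: xs) = (1 + runLenS x xs) :: pyruns (xs.drop (runLenS x xs)) from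
            by simp only [pyruns]]
      simp only [List.map_cons, PySem.List.maxD, PySem.List.max?_id_cons, Option.getD_some,
        Int.ofNat_eq_natCast]
      congr 1
      push_cast
      omega
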